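-- pv_equiv track=rewrite | github.com/cintiasilva-blc/ciencia_da_computacao | Segundo Semestre/ESTRUTURAS DE DADOS /Trabalho/TADEstatico/TADColecaoFigurinhas_E.py | conta_elementos
-- ===== SOURCE A (Python) =====
-- def conta_elementos(texto: str) -> int:
--     '''Conta quantos números existem em uma string no formato "[x, y, z]".
--     Exemplo:
--     >>> c = Colecao(5)
--     >>> c.conta_elementos('[4, 5, 7]')
--     3
--     >>> c.conta_elementos('[]')
--     0
--     '''
--
--     if texto == '[]':
--         return 0
--
--     cont = 0
--     i = 0
--     dentro_num = False
--
--     while i < len(texto):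
--         ch = texto[i]
--         if ch >= '0' and ch <= '9':
--             if not dentro_num:
--                 cont += 1
--                 dentro_num = True
--         else:
--             dentro_num = False
--         i += 1
--
--     return cont
-- ===== SOURCE B (Python) =====
-- import re
--
-- def conta_elementos(texto: str) -> int:
--     return len(re.findall(r'[0-9]+', texto))
-- ===== Notes on version B (the rewrite author's own statement) =====
-- stated objective: idiomatic
-- what changed: Replaces the manual index loop with a dentro_num flag (and the redundant '[]' guard) by finding all maximal ASCII-digit runs with re.findall(r'[0-9]+') and returning their count.
import Mathlib
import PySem

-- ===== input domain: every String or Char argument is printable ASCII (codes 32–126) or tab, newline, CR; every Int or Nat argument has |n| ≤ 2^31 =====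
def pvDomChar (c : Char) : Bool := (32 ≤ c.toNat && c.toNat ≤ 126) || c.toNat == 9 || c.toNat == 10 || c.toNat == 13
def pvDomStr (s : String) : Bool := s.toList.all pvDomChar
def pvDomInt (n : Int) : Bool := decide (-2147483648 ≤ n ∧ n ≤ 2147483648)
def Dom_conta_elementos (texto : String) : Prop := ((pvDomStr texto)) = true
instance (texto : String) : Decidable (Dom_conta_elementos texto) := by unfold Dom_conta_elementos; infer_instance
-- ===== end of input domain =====

-- B counts the maximal ASCII-digit runs (re.findall('[0-9]+')) instead of A's index loop with a
-- dentro_num flag; same value everywhere, chosen for idiomatic clarity.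

-- shared tiny helper: Python's  ch >= '0' and ch <= '9'
def pvDig (c : Char) : Bool := decide ('0' ≤ c) && decide (c ≤ '9')

-- ===== PORT A =====
-- the while loop over i, carrying cont and dentro_num; scanning texto[i] in order = structural recursion
def contaLoopA : List Char → Int → Bool → Int
  | [], cont, _ => cont
  | ch :: rest, cont, dentro =>
      if pvDig ch then
        if !dentro then contaLoopA rest (cont + 1) true
        else contaLoopA rest cont true
      else contaLoopA rest cont false

def conta_elementos (texto : String) : Int :=
  if texto = "[]" then 0
  else contaLoopA texto.toList 0 false

-- ===== PORT B =====
-- re.findall(r'[0-9]+', texto): the list of maximal digit runs, left to right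
def digitRuns : List Char → List (List Char)
  | [] => []
  | c :: cs =>
      if pvDig c then
        (c :: cs).takeWhile pvDig :: digitRuns ((c :: cs).dropWhile pvDig)
      else digitRuns cs
termination_by l => l.length
decreasing_by
  · simp only [List.dropWhile_cons, *]
    exact Nat.lt_succ_of_le (List.length_dropWhile_le _ _)
  · simp

def conta_elementos_alt (texto : String) : Int :=
  (digitRuns texto.toList).length

-- ===== PRECONDITION & SPEC =====
def Spec_conta_elementos (texto : String) (out : Int) : Prop := out = conta_elementos_alt texto
instance (texto : String) (out : Int) : Decidable (Spec_conta_elementos texto out) := by unfold Spec_conta_elementos; infer_instance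

-- ===== CLAIM (what is proved, stated in full; the proofs are below) =====
def Claim_equal_conta_elementos : Prop := ∀ (texto : String), Dom_conta_elementos texto → Spec_conta_elementos texto (conta_elementos texto)

-- ===== LEMMAS AND PROOFS =====

-- once dentro_num is set, the loop just skips the rest of the current digit run
theorem contaLoopA_true (cs : List Char) (cont : Int) :
    contaLoopA cs cont true = contaLoopA (cs.dropWhile pvDig) cont false := by
  induction cs with
  | nil => simp [contaLoopA, List.dropWhile]
  | cons c cs ih =>
    by_cases h : pvDig c = true
    · simpa [contaLoopA, h, List.dropWhile_cons] using ih
    · simp [contaLoopA, h]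

-- the loop started with the flag down adds one per maximal digit run
theorem contaLoopA_runs_aux : ∀ (n : Nat) (cs : List Char), cs.length ≤ n → ∀ cont : Int,
    contaLoopA cs cont false = cont + (digitRuns cs).length := by
  intro n
  induction n with
  | zero =>
    intro cs hcs cont
    rw [List.length_eq_zero_iff.mp (Nat.le_zero.mp hcs)]
    simp [contaLoopA, digitRuns]
  | succ n ih =>
    intro cs hcs cont
    match cs with
    | [] => simp [contaLoopA, digitRuns]
    | c :: cs =>
      by_cases h : pvDig c = true
      · have hlen : (List.dropWhile pvDig cs).length < (c :: cs).length :=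
          Nat.lt_succ_of_le (List.length_dropWhile_le _ _)
        have hle : (List.dropWhile pvDig cs).length ≤ n :=
          Nat.le_of_lt_succ (Nat.lt_of_lt_of_le hlen hcs)
        rw [show contaLoopA (c :: cs) cont false = contaLoopA cs (cont + 1) true by
              simp [contaLoopA, h],
            contaLoopA_true, ih _ hle]
        simp [digitRuns, h]
        ring
      · rw [show contaLoopA (c :: cs) cont false = contaLoopA cs cont false by
              simp [contaLoopA, h],
            ih _ (Nat.le_of_succ_le_succ hcs)]
        simp [digitRuns, h]

-- ===== VERDICT (by name: the statement is the Claim_ definition above) =====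
theorem conta_elementos_spec : Claim_equal_conta_elementos := by
  intro texto _
  unfold Spec_conta_elementos conta_elementos conta_elementos_alt
  by_cases h : texto = "[]"
  · subst h
    rw [if_pos rfl]
    norm_num [show ("[]".toList) = ['[', ']'] from rfl, digitRuns, pvDig]
  · rw [if_neg h, contaLoopA_runs_aux texto.toList.length _ le_rfl]
    simp
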